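-- pv_equiv track=rewrite | github.com/jmom14/snippets | algorithms/grouping_transactions.py | group_transactions
-- ===== SOURCE A (Python) =====
-- def group_transactions(transactions):
--     frequency_map = {}
--     frequency_map_agg = {}
--     output = []
--
--     for t in transactions:
--         if t in frequency_map:
--             frequency_map[t] = frequency_map[t] + 1
--         else:
--             frequency_map[t] = 1
--
--     for key in frequency_map:
--         freq = frequency_map[key]
--         if freq in frequency_map_agg:
--             new_array = frequency_map_agg[freq]
--             new_array.append(key)
--         else:
--             array = []
--             array.append(key)
--             frequency_map_agg[freq] = array
--
--     sorted_object = dict(sorted(frequency_map_agg.items(), reverse=True))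
--
--     for freq in sorted_object:
--         if len(sorted_object[freq]) > 1:
--             sorted_words = sorted(sorted_object[freq])
--             for word in sorted_words:
--                 output.append("{} {}".format(word, freq))
--         else:
--             output.append("{} {}".format(sorted_object[freq][0], freq))
--
--     return output
-- ===== SOURCE B (Python) =====
-- def group_transactions(transactions):
--     counts = {}
--     for t in transactions:
--         counts[t] = counts.get(t, 0) + 1
--     return ["{} {}".format(w, c)
--             for w, c in sorted(counts.items(), key=lambda p: (-p[1], p[0]))]
-- ===== Notes on version B (the rewrite author's own statement) =====
-- stated objective: simpler
-- what changed: Replaces the count-dict plus frequency->words inverted dict with nested per-group sorts by a single dict count pass followed by one flat sort of (word, count) pairs keyed by (-count, word), built with a comprehension.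
import Mathlib
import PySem

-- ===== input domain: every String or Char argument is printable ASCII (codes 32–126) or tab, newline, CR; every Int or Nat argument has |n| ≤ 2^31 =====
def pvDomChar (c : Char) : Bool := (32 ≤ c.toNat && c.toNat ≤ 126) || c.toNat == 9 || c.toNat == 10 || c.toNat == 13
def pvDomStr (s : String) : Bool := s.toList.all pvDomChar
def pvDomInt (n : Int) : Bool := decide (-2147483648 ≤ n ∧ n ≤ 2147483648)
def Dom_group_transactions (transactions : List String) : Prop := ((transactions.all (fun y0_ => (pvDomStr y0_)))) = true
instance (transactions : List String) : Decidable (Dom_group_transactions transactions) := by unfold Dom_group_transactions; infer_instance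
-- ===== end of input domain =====

-- B replaces A's count dict + inverted frequency->words dict + nested per-group sorts by one
-- count pass and a single flat sort keyed by (-count, word); same exact output.

-- "{} {}".format(word, freq)  (used by both ports)
def pyfmt (w : String) (f : Int) : String := w ++ " " ++ PySem.Int.toStr f

-- ===== PORT A =====
def group_transactions (transactions : List String) : List String :=
  let fm := transactions.foldl
    (fun d t => if d.contains t then d.insert t (d.getD t 0 + 1) else d.insert t 1)
    (PySem.Dict.empty : PySem.Dict String Int)
  let agg := fm.keys.foldl
    (fun d k =>
      let freq := fm.getD k 0
      if d.contains freq then d.insert freq (d.getD freq [] ++ [k]) else d.insert freq [k])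
    (PySem.Dict.empty : PySem.Dict Int (List String))
  let sortedObject := PySem.Dict.ofList (PySem.List.sorted agg.items (fun p => p.1) true)
  sortedObject.keys.foldl
    (fun output freq =>
      if (sortedObject.getD freq []).length > 1 then
        output ++ (PySem.List.sorted (sortedObject.getD freq []) (fun w => w) false).map
          (fun word => pyfmt word freq)
      else
        output ++ [pyfmt (PySem.List.pyGetD (sortedObject.getD freq []) 0 "") freq])
    []

-- ===== PORT B =====
def group_transactions_alt (transactions : List String) : List String :=
  let counts := transactions.foldl
    (fun d t => d.insert t (d.getD t 0 + 1)) (PySem.Dict.empty : PySem.Dict String Int)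
  (PySem.List.sorted2 counts.items (fun p => -p.2) (fun p => p.1) false).map
    (fun p => pyfmt p.1 p.2)

-- ===== PRECONDITION & SPEC =====
def Spec_group_transactions (transactions : List String) (out : List String) : Prop := out = group_transactions_alt transactions
instance (transactions : List String) (out : List String) : Decidable (Spec_group_transactions transactions out) := by unfold Spec_group_transactions; infer_instance

-- ===== CLAIM (what is proved, stated in full; the proofs are below) =====
def Claim_equal_group_transactions : Prop := ∀ (transactions : List String), Dom_group_transactions transactions → Spec_group_transactions transactions (group_transactions transactions)

-- ===== LEMMAS AND PROOFS =====

def pvN (ts : List String) (k : String) : Int := (List.count k ts : Int)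

def pvK (ts : List String) : List String := PySem.Set.ofList ts

def pvG (ts : List String) (f : Int) : List String := (pvK ts).filter (fun k => pvN ts k == f)

def pvFs (ts : List String) : List Int := PySem.Set.ofList ((pvK ts).map (pvN ts))

def pvLkey (p : String × Int) : Lex (Int × String) := toLex (-p.2, p.1)

def pvSI (ts : List String) : List (Int × List String) :=
  PySem.List.sorted ((pvFs ts).map (fun f => (f, pvG ts f))) (fun p => p.1) true

def pvZS (ts : List String) : List (String × Int) :=
  (pvSI ts).flatMap (fun p => (PySem.List.sorted p.2 (fun w => w) false).map (fun w => (w, p.1)))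

theorem pv_sorted2_lex (xs : List (String × Int)) :
    PySem.List.sorted2 xs (fun p => -p.2) (fun p => p.1) false
      = PySem.List.sorted xs pvLkey false := by
  have hb : (fun (a b : String × Int) =>
        (decide (-a.2 < -b.2) || (!decide (-b.2 < -a.2) && decide (a.1 < b.1))))
      = fun a b => decide (pvLkey a < pvLkey b) := by
    funext a b
    rcases lt_trichotomy (-a.2) (-b.2) with h | h | h
    · simp [pvLkey, Prod.Lex.toLex_lt_toLex, h]
    · simp [pvLkey, Prod.Lex.toLex_lt_toLex, h]
    · have hne : a.2 ≠ b.2 := by omega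
      simp [pvLkey, Prod.Lex.toLex_lt_toLex, h, lt_asymm h, hne]
  show List.foldl (fun acc x => PySem.List.insertBy (fun a b =>
      (decide (-a.2 < -b.2) || (!decide (-b.2 < -a.2) && decide (a.1 < b.1)))) x acc) [] xs
    = List.foldl (fun acc x => PySem.List.insertBy
      (fun a b => decide (pvLkey a < pvLkey b)) x acc) [] xs
  rw [hb]

theorem pv_agg_items (ts : List String) :
    ((pvK ts).foldl (fun d k =>
        if d.contains (pvN ts k) then d.insert (pvN ts k) (d.getD (pvN ts k) [] ++ [k])
        else d.insert (pvN ts k) [k]) (PySem.Dict.empty : PySem.Dict Int (List String))).items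
      = (pvFs ts).map (fun f => (f, pvG ts f)) := by
  have hstep : (fun (d : PySem.Dict Int (List String)) (k : String) =>
        if d.contains (pvN ts k) then d.insert (pvN ts k) (d.getD (pvN ts k) [] ++ [k])
        else d.insert (pvN ts k) [k])
      = fun d k => d.modify (pvN ts k) [] (· ++ [k]) := by
    funext d k
    by_cases h : d.contains (pvN ts k)
    · rw [if_pos h]; rfl
    · simp only [Bool.not_eq_true] at h
      rw [if_neg (by simp [h])]
      show _ = d.insert (pvN ts k) (d.getD (pvN ts k) [] ++ [k])
      rw [PySem.Dict.getD_of_not_contains _ _ h]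
      rfl
  rw [hstep]
  have hkeys : ((pvK ts).foldl (fun d k => d.modify (pvN ts k) [] (· ++ [k]))
      (PySem.Dict.empty : PySem.Dict Int (List String))).keys = pvFs ts := by
    rw [PySem.Dict.keys_foldl_modify_key (pvK ts) (pvN ts) [] (fun _ k => (· ++ [k])),
      PySem.Dict.keys_empty, PySem.Set.update_nil_left]
    rfl
  have hnodup : ((pvK ts).foldl (fun d k => d.modify (pvN ts k) [] (· ++ [k]))
      (PySem.Dict.empty : PySem.Dict Int (List String))).keys.Nodup := by
    rw [hkeys]; exact PySem.Set.nodup_ofList _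
  have hgetD : ∀ f, ((pvK ts).foldl (fun d k => d.modify (pvN ts k) [] (· ++ [k]))
      (PySem.Dict.empty : PySem.Dict Int (List String))).getD f [] = pvG ts f := by
    intro f
    have h := PySem.Dict.getD_foldl_modify_append ((pvK ts).map (fun k => (pvN ts k, k)))
      (PySem.Dict.empty : PySem.Dict Int (List String)) f
    rw [List.foldl_map] at h
    rw [h, PySem.Dict.getD_empty, List.nil_append, List.filter_map, List.map_map]
    simp [pvG, Function.comp_def]
  rw [PySem.Dict.items_eq_map_keys _ hnodup [], hkeys]
  exact List.map_congr_left (fun f _ => by rw [hgetD])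

theorem pv_sum_ite_zero (c : Nat) (F : List Int) (x : Int) (hx : x ∉ F) :
    (F.map (fun f => if x = f then c else 0)).sum = 0 := by
  apply List.sum_eq_zero
  intro y hy
  rcases List.mem_map.mp hy with ⟨f, hf, rfl⟩
  have hne : x ≠ f := fun h => hx (h ▸ hf)
  rw [if_neg hne]

theorem pv_sum_ite (c : Nat) (F : List Int) (x : Int) (hF : F.Nodup) (hx : x ∈ F) :
    (F.map (fun f => if x = f then c else 0)).sum = c := by
  induction F with
  | nil => cases hx
  | cons f F ih =>
    rcases List.mem_cons.mp hx with rfl | hx'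
    · simp only [List.map_cons, List.sum_cons]
      rw [if_pos trivial, pv_sum_ite_zero c F x (List.nodup_cons.mp hF).1]
      omega
    · have hne : x ≠ f := fun h => ((List.nodup_cons.mp hF).1 (h ▸ hx')).elim
      simp only [List.map_cons, List.sum_cons, if_neg hne]
      rw [ih (List.nodup_cons.mp hF).2 hx']
      omega

theorem pv_mem_Fs (ts : List String) {a : String} (ha : a ∈ pvK ts) : pvN ts a ∈ pvFs ts :=
  (PySem.Set.mem_ofList _ _).mpr (List.mem_map_of_mem ha)

theorem pv_partition (ts : List String) :
    ((pvFs ts).flatMap (fun f => pvG ts f)).Perm (pvK ts) := by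
  rw [List.perm_iff_count]
  intro a
  rw [List.count_flatMap]
  by_cases ha : a ∈ pvK ts
  · have hmap : ((pvFs ts).map (List.count a ∘ fun f => pvG ts f))
        = (pvFs ts).map (fun f => if pvN ts a = f then List.count a (pvK ts) else 0) := by
      apply List.map_congr_left
      intro f _
      by_cases hNa : pvN ts a = f
      · simp only [Function.comp_apply, pvG, if_pos hNa]
        exact List.count_filter (by simp [hNa])
      · simp only [Function.comp_apply, pvG, if_neg hNa]
        apply List.count_eq_zero.mpr
        intro hmem
        exact hNa (by simpa using (List.mem_filter.mp hmem).2)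
    have hnd : (pvFs ts).Nodup := PySem.Set.nodup_ofList _
    rw [hmap, pv_sum_ite _ _ _ hnd (pv_mem_Fs ts ha)]
  · rw [List.count_eq_zero.mpr ha]
    apply List.sum_eq_zero
    intro y hy
    rcases List.mem_map.mp hy with ⟨f, _, rfl⟩
    have h1 := List.Sublist.count_le a (List.filter_sublist (l := pvK ts) (p := fun k => pvN ts k == f))
    have h2 := List.count_eq_zero.mpr ha
    simp only [Function.comp_apply, pvG]
    omega

theorem pv_G_eq (ts : List String) {f : Int} {w : String} (hw : w ∈ pvG ts f) : pvN ts w = f := by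
  simpa using (List.mem_filter.mp hw).2

theorem pv_perm (ts : List String) :
    (pvZS ts).Perm ((pvK ts).map (fun k => (k, pvN ts k))) := by
  unfold pvZS
  have h1 : ((pvSI ts).flatMap (fun p => (PySem.List.sorted p.2 (fun w => w) false).map (fun w => (w, p.1)))).Perm
      (((pvFs ts).map (fun f => (f, pvG ts f))).flatMap
        (fun p => (PySem.List.sorted p.2 (fun w => w) false).map (fun w => (w, p.1)))) :=
    List.Perm.flatMap (PySem.List.sorted_perm _ _ _) (fun _ _ => List.Perm.refl _)
  refine h1.trans ?_
  rw [List.flatMap_map]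
  have h2 : ((pvFs ts).flatMap
        (fun f => (PySem.List.sorted (pvG ts f) (fun w => w) false).map (fun w => (w, f)))).Perm
      ((pvFs ts).flatMap (fun f => (pvG ts f).map (fun w => (w, pvN ts w)))) := by
    refine List.Perm.flatMap (List.Perm.refl _) (fun f _ => ?_)
    have hp := (PySem.List.sorted_perm (pvG ts f) (fun w => w) false).map (fun w => (w, f))
    have heq : (pvG ts f).map (fun w => (w, f)) = (pvG ts f).map (fun w => (w, pvN ts w)) :=
      List.map_congr_left (fun w hw => by rw [pv_G_eq ts hw])
    exact heq ▸ hp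
  refine h2.trans ?_
  rw [← List.map_flatMap]
  exact (pv_partition ts).map _

theorem pv_SI_fst_nodup (ts : List String) : ((pvSI ts).map (fun p => p.1)).Nodup := by
  have h2 := (PySem.List.sorted_perm ((pvFs ts).map (fun f => (f, pvG ts f))) (fun p => p.1) true).map
    (fun p => p.1)
  have h3 : (((pvFs ts).map (fun f => (f, pvG ts f))).map (fun p => p.1)) = pvFs ts := by
    rw [List.map_map]
    exact List.map_id'' (fun _ => rfl) _
  exact h2.nodup_iff.mpr (by rw [h3]; exact PySem.Set.nodup_ofList _)

theorem pv_SI_mem (ts : List String) {p : Int × List String} (hp : p ∈ pvSI ts) :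
    p.1 ∈ pvFs ts ∧ p.2 = pvG ts p.1 := by
  have h := (PySem.List.mem_sorted _ _ _ _).mp hp
  rcases List.mem_map.mp h with ⟨f, hf, rfl⟩
  exact ⟨hf, rfl⟩

theorem pv_G_nodup (ts : List String) (f : Int) : (pvG ts f).Nodup :=
  (List.filter_sublist).nodup (PySem.Set.nodup_ofList ts)

theorem pv_G_ne_nil (ts : List String) {f : Int} (hf : f ∈ pvFs ts) : pvG ts f ≠ [] := by
  rcases List.mem_map.mp ((PySem.Set.mem_ofList _ _).mp hf) with ⟨k, hk, rfl⟩
  intro h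
  have hm : k ∈ pvG ts (pvN ts k) := List.mem_filter.mpr ⟨hk, by simp⟩
  rw [h] at hm
  cases hm

theorem pv_pairwise (ts : List String) : (pvZS ts).Pairwise (fun a b => pvLkey a < pvLkey b) := by
  unfold pvZS
  rw [List.pairwise_flatMap]
  constructor
  · intro p hp
    rw [List.pairwise_map]
    have hnd2 : p.2.Nodup := by rw [(pv_SI_mem ts hp).2]; exact pv_G_nodup ts p.1
    have hndS : (PySem.List.sorted p.2 (fun w => w) false).Nodup :=
      (PySem.List.sorted_perm p.2 (fun w => w) false).nodup_iff.mpr hnd2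
    have hle := PySem.List.sorted_pairwise p.2 (fun w => w)
    refine (hle.and hndS).imp ?_
    intro a b hab
    exact Prod.Lex.toLex_lt_toLex.mpr (Or.inr ⟨rfl, lt_of_le_of_ne hab.1 hab.2⟩)
  · have h1 : (pvSI ts).Pairwise (fun a b => b.1 ≤ a.1) :=
      PySem.List.sorted_pairwise_rev ((pvFs ts).map (fun f => (f, pvG ts f))) (fun p => p.1)
    have h2 : (pvSI ts).Pairwise (fun a b => a.1 ≠ b.1) := List.pairwise_map.mp (pv_SI_fst_nodup ts)
    refine (h1.and h2).imp ?_
    intro a b hab x hx y hy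
    rcases List.mem_map.mp hx with ⟨w, _, rfl⟩
    rcases List.mem_map.mp hy with ⟨v, _, rfl⟩
    have hba : b.1 < a.1 := lt_of_le_of_ne hab.1 (fun h => hab.2 h.symm)
    exact Prod.Lex.toLex_lt_toLex.mpr (Or.inl (by omega))

theorem pv_fm_eq (ts : List String) :
    ts.foldl (fun d t => if d.contains t then d.insert t (d.getD t 0 + 1) else d.insert t 1)
      (PySem.Dict.empty : PySem.Dict String Int) = PySem.Dict.counter ts := by
  rw [← PySem.Dict.foldl_insert_getD_add_one_eq_counter]
  congr 1
  funext d t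
  by_cases h : d.contains t
  · simp [h]
  · simp only [Bool.not_eq_true] at h
    rw [if_neg (by simp [h]), PySem.Dict.getD_of_not_contains _ _ h]
    norm_num

theorem pv_B_eq (ts : List String) :
    group_transactions_alt ts
      = (PySem.List.sorted ((pvK ts).map (fun k => (k, pvN ts k))) pvLkey false).map
          (fun p => pyfmt p.1 p.2) := by
  simp only [group_transactions_alt]
  rw [PySem.Dict.foldl_insert_getD_add_one_eq_counter, pv_sorted2_lex]
  rw [PySem.Dict.items_counter]
  rfl

theorem pv_items_ofList_SI (ts : List String) :
    (PySem.Dict.ofList (pvSI ts)).items = pvSI ts := by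
  have h := PySem.Dict.items_foldl_insert_fresh (pvSI ts) (fun p => p.1) (fun p => p.2)
    (PySem.Dict.empty : PySem.Dict Int (List String))
    (fun a _ => PySem.Dict.contains_empty _) (pv_SI_fst_nodup ts)
  have h2 : (PySem.Dict.ofList (pvSI ts)).items
      = ((pvSI ts).foldl (fun d a => d.insert a.1 a.2)
          (PySem.Dict.empty : PySem.Dict Int (List String))).items := rfl
  have h3 : (PySem.Dict.empty : PySem.Dict Int (List String)).items = [] := rfl
  rw [h2, h, h3, List.nil_append]
  simp

theorem pv_A_eq (ts : List String) :
    group_transactions ts = (pvZS ts).map (fun q => pyfmt q.1 q.2) := by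
  have hKdef : PySem.Set.ofList ts = pvK ts := rfl
  have hN : ∀ k : String, ((List.count k ts : Nat) : Int) = pvN ts k := fun _ => rfl
  simp only [group_transactions]
  rw [pv_fm_eq, PySem.Dict.keys_counter]
  simp only [PySem.Dict.getD_counter, hKdef, hN]
  rw [pv_agg_items]
  have hSI : PySem.List.sorted ((pvFs ts).map (fun f => (f, pvG ts f))) (fun p => p.1) true
      = pvSI ts := rfl
  rw [hSI]
  have hkeys : (PySem.Dict.ofList (pvSI ts)).keys = (pvSI ts).map (fun p => p.1) := by
    show (PySem.Dict.ofList (pvSI ts)).items.map (fun p => p.1) = _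
    rw [pv_items_ofList_SI]
  rw [hkeys, List.foldl_map]
  rw [PySem.List.foldl_congr_mem (pvSI ts) _
    (fun out p => out ++ (PySem.List.sorted p.2 (fun w => w) false).map (fun w => pyfmt w p.1)) []
    ?hcong]
  case hcong =>
    intro acc p hp
    dsimp only
    have hget : (PySem.Dict.ofList (pvSI ts)).getD p.1 [] = p.2 :=
      PySem.Dict.getD_of_mem_items _
        (by rw [pv_items_ofList_SI]; exact hp) (PySem.Dict.nodup_keys_ofList _) []
    rw [hget]
    have hne : p.2 ≠ [] := by
      rw [(pv_SI_mem ts hp).2]; exact pv_G_ne_nil ts (pv_SI_mem ts hp).1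
    rcases h2 : p.2 with _ | ⟨w, t⟩
    · exact absurd h2 hne
    · rcases t with _ | ⟨x, r⟩
      · rw [if_neg (by simp)]
        rfl
      · rw [if_pos (by simp)]
  rw [PySem.List.foldl_append_eq_flatMap, List.nil_append]
  unfold pvZS
  rw [List.map_flatMap]
  simp only [List.map_map]
  rfl

theorem pv_main (ts : List String) : group_transactions ts = group_transactions_alt ts := by
  rw [pv_A_eq, pv_B_eq,
    PySem.List.sorted_eq_of_perm_of_pairwise_lt _ (pvZS ts) pvLkey (pv_perm ts) (pv_pairwise ts)]

-- ===== VERDICT (by name: the statement is the Claim_ definition above) =====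
theorem group_transactions_spec : Claim_equal_group_transactions := by
  intro ts _
  unfold Spec_group_transactions
  exact pv_main ts
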